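-- pv_equiv track=rewrite | github.com/Amitai5/CS-534 | Assignment 2/2.2.py | mvToBoard
-- ===== SOURCE A (Python) =====
-- def mvToBoard(mv):
--     size = k
--     w = []
--     for i in range(k):
--         w.append(i + 1)
--
--     string = ""
--     for i in range(size):
--         for j in range(size):
--             if mv[j] == i:
--                 string = string + " " + str(w[j]) + " "
--             else:
--                 string = string + " 0 "
--             if j == size - 1:
--                 string = string + "\n"
--     return string
--
-- k = 5
-- ===== SOURCE B (Python) =====
-- k = 5
--
-- def mvToBoard(mv):
--     size = k
--     grid = [[0] * size for _ in range(size)]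
--     for j in range(size):
--         if mv[j] in range(size):
--             grid[mv[j]][j] = j + 1
--     out = []
--     for row in grid:
--         for c in row:
--             out.append(" " + str(c) + " ")
--         out.append("\n")
--     return "".join(out)
-- ===== Notes on version B (the rewrite author's own statement) =====
-- stated objective: alternative
-- what changed: Replaces the 25-comparison nested loop (comparing every cell against every move) with a build-the-table-then-emit decomposition: one pass places each move into a zero grid, a second pass renders it, joining collected pieces instead of repeated string concatenation.
import Mathlib
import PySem

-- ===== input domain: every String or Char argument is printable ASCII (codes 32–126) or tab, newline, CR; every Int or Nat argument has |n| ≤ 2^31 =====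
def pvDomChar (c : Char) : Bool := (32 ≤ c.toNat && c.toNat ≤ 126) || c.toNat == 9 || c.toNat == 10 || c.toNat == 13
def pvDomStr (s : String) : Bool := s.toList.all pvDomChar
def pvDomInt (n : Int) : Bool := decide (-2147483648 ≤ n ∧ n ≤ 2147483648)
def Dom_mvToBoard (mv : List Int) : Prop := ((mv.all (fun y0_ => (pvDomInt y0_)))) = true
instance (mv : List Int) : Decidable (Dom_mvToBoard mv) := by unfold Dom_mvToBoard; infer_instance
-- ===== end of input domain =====

-- B replaces the 25-comparison nested loop by "build a zero grid, place each move, then render it" (alternative decomposition, not claimed faster).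

-- ===== PORT A =====
def mvToBoard (mv : List Int) : String :=
  let size : Int := 5
  let w : List Int := (PySem.List.pyRange 0 5 1).foldl (fun w i => w ++ [i + 1]) []
  (PySem.List.pyRange 0 size 1).foldl (fun s i =>
    (PySem.List.pyRange 0 size 1).foldl (fun s j =>
      let s := if PySem.List.pyGetD mv j 0 = i
               then s ++ " " ++ PySem.Int.toStr (PySem.List.pyGetD w j 0) ++ " "
               else s ++ " 0 "
      if j = size - 1 then s ++ "\n" else s) s) ""

-- ===== PORT B =====
-- one placement step of Source B's loop: `if mv[j] in range(size): grid[mv[j]][j] = j + 1`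
def pvPlace (g : List (List Int)) (j x : Int) : List (List Int) :=
  if 0 ≤ x ∧ x < 5 then g.set x.toNat ((g.getD x.toNat []).set j.toNat (j + 1)) else g

def mvToBoard_alt (mv : List Int) : String :=
  let grid0 : List (List Int) := List.replicate 5 (List.replicate 5 0)
  let grid := (PySem.List.pyRange 0 5 1).foldl
    (fun g j => pvPlace g j (PySem.List.pyGetD mv j 0)) grid0
  let out := grid.foldl (fun acc row =>
      row.foldl (fun acc c => acc ++ [" " ++ PySem.Int.toStr c ++ " "]) acc ++ ["\n"])
    ([] : List String)
  String.join out

-- ===== PRECONDITION & SPEC =====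
-- Both Pythons raise IndexError (mv[j], j < 5) when the move list is shorter than 5.
def Pre_mvToBoard (mv : List Int) : Prop := 5 ≤ mv.length
instance (mv : List Int) : Decidable (Pre_mvToBoard mv) := by unfold Pre_mvToBoard; infer_instance
def pvWitness_mvToBoard : List Int := [0, 1, 2, 3, 4]

def Spec_mvToBoard (mv : List Int) (out : String) : Prop := out = mvToBoard_alt mv
instance (mv : List Int) (out : String) : Decidable (Spec_mvToBoard mv out) := by unfold Spec_mvToBoard; infer_instance

-- ===== CLAIM (what is proved, stated in full; the proofs are below) =====
def Claim_equal_mvToBoard : Prop := ∀ (mv : List Int), Dom_mvToBoard mv → Pre_mvToBoard mv → Spec_mvToBoard mv (mvToBoard mv)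

-- ===== LEMMAS AND PROOFS =====

def pvCell (x i j : Int) : Int := if x = i then j + 1 else 0

def pvSpecGrid (a b c d e : Int) : List (List Int) :=
  [[pvCell a 0 0, pvCell b 0 1, pvCell c 0 2, pvCell d 0 3, pvCell e 0 4],
   [pvCell a 1 0, pvCell b 1 1, pvCell c 1 2, pvCell d 1 3, pvCell e 1 4],
   [pvCell a 2 0, pvCell b 2 1, pvCell c 2 2, pvCell d 2 3, pvCell e 2 4],
   [pvCell a 3 0, pvCell b 3 1, pvCell c 3 2, pvCell d 3 3, pvCell e 3 4],
   [pvCell a 4 0, pvCell b 4 1, pvCell c 4 2, pvCell d 4 3, pvCell e 4 4]]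

def pvShape (g : List (List Int)) : Prop := g.length = 5 ∧ ∀ r ∈ g, r.length = 5

def pvG2 (g : List (List Int)) (i j : Nat) : Int := (g.getD i []).getD j 0

lemma pvGetD_mem (g : List (List Int)) (n : Nat) (hg5 : g.length = 5) (hn : n < 5) :
    g.getD n [] ∈ g := by
  have hlt : n < g.length := by omega
  rw [List.getD_eq_getElem?_getD, List.getElem?_eq_getElem hlt]
  exact List.getElem_mem hlt

lemma pvPlace_shape (g : List (List Int)) (j x : Int) (h : pvShape g) :
    pvShape (pvPlace g j x) := by
  obtain ⟨hg5, hgr⟩ := h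
  unfold pvPlace
  split
  · rename_i hx
    refine ⟨by simpa using hg5, ?_⟩
    intro r hr
    rcases List.mem_or_eq_of_mem_set hr with h' | h'
    · exact hgr r h'
    · subst h'
      rw [List.length_set]
      exact hgr _ (pvGetD_mem g _ hg5 (by omega))
  · exact ⟨hg5, hgr⟩

lemma pvG2_place (g : List (List Int)) (i j : Nat) (hi : i < 5) (hj : j < 5)
    (jc x : Int) (hjc : 0 ≤ jc) (hg : pvShape g) :
    pvG2 (pvPlace g jc x) i j =
      if x = (i : Int) ∧ (j : Int) = jc then jc + 1 else pvG2 g i j := by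
  obtain ⟨hg5, hgr⟩ := hg
  unfold pvPlace pvG2
  split
  · rename_i hx
    obtain ⟨hx0, hx5⟩ := hx
    by_cases hxi : x.toNat = i
    · have hxi' : x = (i : Int) := by omega
      have hrow : (g.getD x.toNat []).length = 5 := hgr _ (pvGetD_mem g _ hg5 (by omega))
      have hilt : i < g.length := by omega
      rw [hxi] at hrow ⊢
      simp only [List.getD_eq_getElem?_getD]
      rw [List.getElem?_set_self hilt]
      simp only [Option.getD_some]
      by_cases hjj : j = jc.toNat
      · have hji : (j : Int) = jc := by subst hjj; omega
        have hjlt : jc.toNat < (g.getD i []).length := by omega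
        simp only [List.getD_eq_getElem?_getD] at hjlt
        rw [hjj, List.getElem?_set_self hjlt]
        simp [hxi']
        omega
      · have hji : ¬ ((j : Int) = jc) := by intro h; exact hjj (by omega)
        rw [List.getElem?_set_ne (Ne.symm hjj)]
        simp [hji]
    · have hxi' : ¬ (x = (i : Int)) := by intro h; exact hxi (by omega)
      simp only [List.getD_eq_getElem?_getD]
      rw [List.getElem?_set_ne hxi]
      simp [hxi']
  · rename_i hx
    rw [if_neg]
    rintro ⟨rfl, -⟩
    exact hx ⟨by omega, by omega⟩

lemma pvGrid_eq (a b c d e : Int) :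
    pvPlace (pvPlace (pvPlace (pvPlace (pvPlace
      (List.replicate 5 (List.replicate 5 0)) 0 a) 1 b) 2 c) 3 d) 4 e
      = pvSpecGrid a b c d e := by
  have s0 : pvShape (List.replicate 5 (List.replicate 5 (0 : Int))) := by
    constructor
    · simp
    · intro r hr; rw [List.eq_of_mem_replicate hr]; simp
  have s1 := pvPlace_shape _ 0 a s0
  have s2 := pvPlace_shape _ 1 b s1
  have s3 := pvPlace_shape _ 2 c s2
  have s4 := pvPlace_shape _ 3 d s3
  have s5 := pvPlace_shape _ 4 e s4
  apply List.ext_getElem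
  · rw [s5.1]; simp [pvSpecGrid]
  · intro i hi hi2
    have hi5 : i < 5 := by rw [s5.1] at hi; exact hi
    apply List.ext_getElem
    · rw [s5.2 _ (List.getElem_mem hi)]
      have : i < 5 := hi5
      interval_cases i <;> simp [pvSpecGrid]
    · intro j hj hj2
      have hj5 : j < 5 := by rw [s5.2 _ (List.getElem_mem hi)] at hj; exact hj
      have hL : (pvPlace (pvPlace (pvPlace (pvPlace (pvPlace
          (List.replicate 5 (List.replicate 5 (0:Int))) 0 a) 1 b) 2 c) 3 d) 4 e)[i][j]
          = pvG2 (pvPlace (pvPlace (pvPlace (pvPlace (pvPlace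
          (List.replicate 5 (List.replicate 5 (0:Int))) 0 a) 1 b) 2 c) 3 d) 4 e) i j := by
        simp only [pvG2, List.getD_eq_getElem?_getD, List.getElem?_eq_getElem hi,
          List.getElem?_eq_getElem hj, Option.getD_some]
      rw [hL,
        pvG2_place _ i j hi5 hj5 4 e (by omega) s4,
        pvG2_place _ i j hi5 hj5 3 d (by omega) s3,
        pvG2_place _ i j hi5 hj5 2 c (by omega) s2,
        pvG2_place _ i j hi5 hj5 1 b (by omega) s1,
        pvG2_place _ i j hi5 hj5 0 a (by omega) s0]
      have hG0 : pvG2 (List.replicate 5 (List.replicate 5 (0:Int))) i j = 0 := by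
        interval_cases i <;> interval_cases j <;> rfl
      rw [hG0]
      interval_cases i <;> interval_cases j <;>
        simp [pvSpecGrid, pvCell]



lemma pvIteFactor (c : Prop) [inst : Decidable c] (s x y : String) :
    (if c then s ++ x else s ++ y) = s ++ (if c then x else y) :=
  (apply_ite (s ++ ·) c x y).symm

lemma pvCellStr0 (c : Prop) [inst : Decidable c] (v : Int) :
    (if c then " " ++ (PySem.Int.toStr v ++ " ") else " 0 ") =
    " " ++ (PySem.Int.toStr (if c then v else 0) ++ " ") := by
  split_ifs <;> rfl

set_option maxHeartbeats 2000000 in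
lemma pvMain (a b c d e : Int) (t : List Int) :
    mvToBoard (a::b::c::d::e::t) = mvToBoard_alt (a::b::c::d::e::t) := by
  have hr : PySem.List.pyRange 0 5 1 = [0, 1, 2, 3, 4] := by decide
  have g0 : PySem.List.pyGetD (a::b::c::d::e::t) 0 0 = a := by simp [PySem.List.pyGetD_ofNat']
  have g1 : PySem.List.pyGetD (a::b::c::d::e::t) 1 0 = b := by simp [PySem.List.pyGetD_ofNat']
  have g2 : PySem.List.pyGetD (a::b::c::d::e::t) 2 0 = c := by simp [PySem.List.pyGetD_ofNat']
  have g3 : PySem.List.pyGetD (a::b::c::d::e::t) 3 0 = d := by simp [PySem.List.pyGetD_ofNat']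
  have g4 : PySem.List.pyGetD (a::b::c::d::e::t) 4 0 = e := by simp [PySem.List.pyGetD_ofNat']
  simp only [mvToBoard_alt, hr, List.foldl, g0, g1, g2, g3, g4]
  rw [pvGrid_eq a b c d e]
  simp [mvToBoard, hr, List.foldl, g0, g1, g2, g3, g4, PySem.List.pyGetD_ofNat',
    pvSpecGrid, pvCell, String.join, pvIteFactor, pvCellStr0, String.append_assoc]

-- ===== VERDICT (by name: the statement is the Claim_ definition above) =====
theorem mvToBoard_spec : Claim_equal_mvToBoard := by
  intro mv hdom hpre
  unfold Pre_mvToBoard at hpre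
  unfold Spec_mvToBoard
  rcases mv with _ | ⟨a, _ | ⟨b, _ | ⟨c, _ | ⟨d, _ | ⟨e, t⟩⟩⟩⟩⟩
  · exact absurd hpre (by simp)
  · exact absurd hpre (by simp)
  · exact absurd hpre (by simp)
  · exact absurd hpre (by simp)
  · exact absurd hpre (by simp)
  · exact pvMain a b c d e t
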